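-- pv_equiv track=rewrite | github.com/tiemingsun/Data-Mining-Coursework | hw2-py/task2.py | gather_same_size
-- ===== SOURCE A (Python) =====
-- def gather_same_size(reduce_list):
--     if len(reduce_list) == 0:
--         return []
--     reduce_list = sorted(reduce_list, key=lambda x: [len(x[0]), x[0]])
--     max_tuple_size = len(reduce_list[-1][0])
--     res = [[] for _ in range(max_tuple_size)]
--     for i in reduce_list:
--         res[len(i[0])-1].append(i[0])
--
--     return res
-- ===== SOURCE B (Python) =====
-- def gather_same_size(reduce_list):
--     buckets = {}
--     for key, _ in reduce_list:
--         buckets.setdefault(len(key), []).append(key)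
--     res = [[] for _ in range(max(buckets, default=0))]
--     for length in sorted(buckets):
--         res[length - 1].extend(sorted(buckets[length]))
--     return res
-- ===== Notes on version B (the rewrite author's own statement) =====
-- stated objective: alternative
-- what changed: B replaces A's global sort of all tuples by (length, value) followed by a distribution pass with a single bucketing pass into a length-keyed dict and an independent sort of each bucket, filled in ascending key order.
import Mathlib
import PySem

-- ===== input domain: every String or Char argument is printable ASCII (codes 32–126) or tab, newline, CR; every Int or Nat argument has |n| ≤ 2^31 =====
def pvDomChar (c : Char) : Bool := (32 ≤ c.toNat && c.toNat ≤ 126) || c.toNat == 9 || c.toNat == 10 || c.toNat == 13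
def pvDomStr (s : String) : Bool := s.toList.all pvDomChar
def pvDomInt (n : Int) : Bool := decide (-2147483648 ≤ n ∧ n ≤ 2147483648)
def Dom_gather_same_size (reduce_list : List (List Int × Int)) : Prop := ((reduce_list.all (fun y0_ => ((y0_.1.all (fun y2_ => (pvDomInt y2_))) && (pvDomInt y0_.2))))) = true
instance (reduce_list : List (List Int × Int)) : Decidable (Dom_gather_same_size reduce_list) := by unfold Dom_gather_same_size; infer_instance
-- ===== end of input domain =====

-- B replaces A's global sort-by-(length, value) followed by a distribution pass with one
-- bucketing pass into a length-keyed dict and an independent sort of each bucket (objective: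
-- alternative; same asymptotic cost).

-- models Python's `lst[i].append(..)/.extend(..)`: the index wraps when negative
-- (PySem.List.pyIdx? is exactly Python's index rule); an out-of-range index (where Python
-- raises IndexError, excluded by Pre_) leaves the list unchanged — a totalization guard only.
def pyExtendAt (res : List (List (List Int))) (i : Int) (v : List (List Int)) : List (List (List Int)) :=
  match PySem.List.pyIdx? res.length i with
  | some j => res.set j (res.getD j [] ++ v)
  | none => res

-- ===== PORT A =====
def gather_same_size (reduce_list : List (List Int × Int)) : List (List (List Int)) :=
  if reduce_list.length = 0 then []
  else
    let rl := PySem.List.sorted2 reduce_list (fun x => ((x.1.length : Int))) (fun x => x.1)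
    match PySem.List.pyGet? rl (-1) with
    | none => []  -- unreachable guard: rl is nonempty here
    | some last =>
      rl.foldl (fun res i => pyExtendAt res ((i.1.length : Int) - 1) [i.1])
        (List.replicate last.1.length ([] : List (List Int)))

-- ===== PORT B =====
def gather_same_size_alt (reduce_list : List (List Int × Int)) : List (List (List Int)) :=
  let buckets : PySem.Dict Int (List (List Int)) :=
    reduce_list.foldl (fun d p => d.modify ((p.1.length : Int)) [] (fun b => b ++ [p.1]))
      PySem.Dict.empty
  (PySem.List.sorted buckets.keys (fun k => k)).foldl
    (fun res length =>
      pyExtendAt res (length - 1) (PySem.List.sorted (buckets.getD length []) (fun x => x)))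
    (List.replicate (PySem.List.maxD buckets.keys (fun k => k) 0).toNat ([] : List (List Int)))

-- ===== PRECONDITION & SPEC =====
-- Pre_ excludes exactly the nonempty inputs all of whose tuples have an empty first component:
-- there the result list is empty and both A and B raise IndexError at `res[-1]`.
def Pre_gather_same_size (reduce_list : List (List Int × Int)) : Prop :=
  reduce_list = [] ∨ ∃ p ∈ reduce_list, p.1 ≠ []
instance (reduce_list : List (List Int × Int)) : Decidable (Pre_gather_same_size reduce_list) := by
  unfold Pre_gather_same_size; infer_instance

def pvWitness_gather_same_size : (List (List Int × Int)) := [([1], 2)]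

def Spec_gather_same_size (reduce_list : List (List Int × Int)) (out : List (List (List Int))) : Prop := out = gather_same_size_alt reduce_list
instance (reduce_list : List (List Int × Int)) (out : List (List (List Int))) : Decidable (Spec_gather_same_size reduce_list out) := by unfold Spec_gather_same_size; infer_instance

-- ===== CLAIM (what is proved, stated in full; the proofs are below) =====
def Claim_equal_gather_same_size : Prop := ∀ (reduce_list : List (List Int × Int)), Dom_gather_same_size reduce_list → Pre_gather_same_size reduce_list → Spec_gather_same_size reduce_list (gather_same_size reduce_list)

-- ===== LEMMAS AND PROOFS =====

-- `sorted` does not depend on which (defeq) LT / Decidable instances elaboration picked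
theorem pv_sorted_instEq {α κ : Type} {i1 i2 : LT κ} (h : i1 = i2)
    (d1 : @DecidableLT κ i1) (d2 : @DecidableLT κ i2) (xs : List α) (key : α → κ) (rev : Bool) :
    @PySem.List.sorted α κ i1 d1 xs key rev = @PySem.List.sorted α κ i2 d2 xs key rev := by
  subst h; congr 1

theorem pv_max?_instEq {α κ : Type} {i1 i2 : LT κ} (h : i1 = i2)
    (d1 : @DecidableLT κ i1) (d2 : @DecidableLT κ i2) (xs : List α) (key : α → κ) :
    @PySem.List.max? α κ i1 d1 xs key = @PySem.List.max? α κ i2 d2 xs key := by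
  subst h; congr 1


-- the (length, value) sort key of A, as a lexicographic pair
def pvKf (x : List Int) : Lex (Int × List Int) := toLex ((x.length : Int), x)

theorem pv_kf_le_len {a b : List Int} (h : pvKf a ≤ pvKf b) : (a.length : Int) ≤ (b.length : Int) := by
  rcases Prod.Lex.le_iff.1 h with h1 | ⟨h1, _⟩
  · exact le_of_lt h1
  · exact le_of_eq h1

theorem pv_kf_le_of_len_eq {a b : List Int} (h : pvKf a ≤ pvKf b)
    (he : (a.length : Int) = (b.length : Int)) : a ≤ b := by
  rcases Prod.Lex.le_iff.1 h with h1 | ⟨_, h2⟩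
  · exact absurd h1 (by simp [pvKf, he])
  · exact h2

theorem pv_foldl_insertBy_congr {α : Type} (f g : α → α → Bool) (h : ∀ a b, f a b = g a b)
    (xs acc : List α) :
    xs.foldl (fun acc x => PySem.List.insertBy f x acc) acc
      = xs.foldl (fun acc x => PySem.List.insertBy g x acc) acc := by
  rw [show f = g from funext fun a => funext fun b => h a b]

theorem pv_sorted2_eq (xs : List (List Int × Int)) :
    PySem.List.sorted2 xs (fun x => ((x.1.length : Int))) (fun x => x.1)
      = PySem.List.sorted xs (fun x => pvKf x.1) := by
  rw [pv_sorted_instEq (i2 := (Prod.Lex.instLinearOrder Int (List Int)).toLT)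
    (d2 := (Prod.Lex.instLinearOrder Int (List Int)).toDecidableLT) rfl]
  show List.foldl (fun acc x => PySem.List.insertBy _ x acc) [] xs
    = List.foldl (fun acc x => PySem.List.insertBy _ x acc) [] xs
  apply pv_foldl_insertBy_congr
  intro a b
  show (decide ((a.1.length : Int) < (b.1.length : Int))
      || (!decide ((b.1.length : Int) < (a.1.length : Int)) && decide (a.1 < b.1)))
    = decide (pvKf a.1 < pvKf b.1)
  rw [Bool.eq_iff_iff]
  simp only [Bool.or_eq_true, Bool.and_eq_true, Bool.not_eq_true', decide_eq_true_iff,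
    decide_eq_false_iff_not, pvKf, Prod.Lex.lt_iff, ofLex_toLex]
  constructor
  · rintro (h | ⟨h1, h2⟩)
    · exact Or.inl h
    · by_cases hA : (a.1.length : Int) < (b.1.length : Int)
      · exact Or.inl hA
      · exact Or.inr ⟨by omega, h2⟩
  · rintro (h | ⟨h1, h2⟩)
    · exact Or.inl h
    · exact Or.inr ⟨by omega, h2⟩

-- ---- pyExtendAt and the distribution fold ----

theorem pyExtendAt_length (r : List (List (List Int))) (i : Int) (v : List (List Int)) :
    (pyExtendAt r i v).length = r.length := by
  unfold pyExtendAt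
  cases h : PySem.List.pyIdx? r.length i <;> simp

theorem pv_pyIdx?_lt {n : Nat} {i : Int} {j : Nat} (h : PySem.List.pyIdx? n i = some j) : j < n := by
  unfold PySem.List.pyIdx? at h
  split_ifs at h <;> simp_all <;> omega

theorem pyExtendAt_getD (r : List (List (List Int))) (i : Int) (v : List (List Int)) (j : Nat)
    (hj : j < r.length) :
    (pyExtendAt r i v).getD j []
      = r.getD j [] ++ (if PySem.List.pyIdx? r.length i == some j then v else []) := by
  unfold pyExtendAt
  cases h : PySem.List.pyIdx? r.length i with
  | none => simp
  | some k =>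
    have hk := pv_pyIdx?_lt h
    by_cases hkj : k = j
    · subst hkj
      simp [List.getD_eq_getElem?_getD, hk]
    · simp [List.getD_eq_getElem?_getD, hkj]

theorem pv_foldl_extendAt_length {β : Type} (g : β → Int) (v : β → List (List Int)) (xs : List β)
    (r0 : List (List (List Int))) :
    (xs.foldl (fun r x => pyExtendAt r (g x) (v x)) r0).length = r0.length := by
  induction xs generalizing r0 with
  | nil => rfl
  | cons x t ih => simp only [List.foldl_cons]; rw [ih, pyExtendAt_length]

theorem pv_foldl_extendAt_getD {β : Type} (g : β → Int) (v : β → List (List Int)) (xs : List β)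
    (r0 : List (List (List Int))) (j : Nat) (hj : j < r0.length) :
    (xs.foldl (fun r x => pyExtendAt r (g x) (v x)) r0).getD j []
      = r0.getD j []
        ++ (xs.filter (fun x => PySem.List.pyIdx? r0.length (g x) == some j)).flatMap v := by
  induction xs generalizing r0 with
  | nil => simp
  | cons x t ih =>
    simp only [List.foldl_cons, List.filter_cons]
    rw [ih _ (by rw [pyExtendAt_length]; exact hj)]
    rw [pyExtendAt_length, pyExtendAt_getD _ _ _ _ hj]
    by_cases hx : PySem.List.pyIdx? r0.length (g x) == some j
    · simp [hx, List.append_assoc]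
    · simp [hx]

theorem pv_pyIdx?_pred (n : Nat) (L : Int) (h0 : 0 ≤ L) (hle : L ≤ (n : Int)) (j : Nat)
    (hj : j < n) :
    (PySem.List.pyIdx? n (L - 1) = some j) ↔ (L = (j : Int) + 1 ∨ (L = 0 ∧ j = n - 1)) := by
  unfold PySem.List.pyIdx?
  split_ifs with h1 h2 h3 <;> simp_all <;> omega

-- ---- characterisations of B's dict ----

theorem pv_buckets_getD (rl : List (List Int × Int)) (L : Int) :
    ((rl.foldl (fun d p => d.modify ((p.1.length : Int)) [] (fun b => b ++ [p.1]))
        PySem.Dict.empty).getD L [])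
      = (rl.map Prod.fst).filter (fun y => ((y.length : Int) == L)) := by
  have h := PySem.Dict.getD_foldl_modify_append
    (l := rl.map (fun p => (((p.1.length : Int)), p.1))) (d := (PySem.Dict.empty : PySem.Dict Int (List (List Int)))) (c := L)
  simp only [List.foldl_map] at h
  rw [h, PySem.Dict.getD_empty]
  simp [List.filter_map, Function.comp_def]

theorem pv_buckets_keys (rl : List (List Int × Int)) :
    ((rl.foldl (fun d p => d.modify ((p.1.length : Int)) [] (fun b => b ++ [p.1]))
        PySem.Dict.empty).keys)
      = PySem.Set.ofList ((rl.map Prod.fst).map (fun y => (y.length : Int))) := by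
  have h := PySem.Dict.keys_foldl_modify_key
    (l := rl) (key := fun p : List Int × Int => ((p.1.length : Int))) (d0 := ([] : List (List Int)))
    (f := fun d p => (fun b => b ++ [p.1])) (d := PySem.Dict.empty)
  rw [h, PySem.Dict.keys_empty]
  simp [PySem.Set.ofList, PySem.Set.update, List.map_map, Function.comp_def]

-- ---- bucket equality: a length-class of the globally sorted list is the sorted bucket ----

theorem pv_filter_len_sorted {S ks : List (List Int)}
    (hp : S.Pairwise (fun a b => pvKf a ≤ pvKf b)) (hperm : S.Perm ks) (L : Int) :
    S.filter (fun x => ((x.length : Int) == L))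
      = PySem.List.sorted (ks.filter (fun x => ((x.length : Int) == L))) (fun x => x) := by
  have hsor := pv_sorted_instEq (i1 := List.instLT)
    (i2 := (List.instLinearOrder (α := Int)).toLT) rfl
    (fun a b => a.decidableLT b) (List.instLinearOrder (α := Int)).toDecidableLT
    (ks.filter (fun x => ((x.length : Int) == L))) (fun x : List Int => x) false
  have hperm2 := (hperm.filter (fun x => ((x.length : Int) == L))).trans
    ((PySem.List.sorted_perm (ks.filter (fun x => ((x.length : Int) == L)))
      (fun x : List Int => x) false).symm)
  rw [hsor] at hperm2 ⊢
  have hpw1 : (S.filter (fun x => ((x.length : Int) == L))).Pairwise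
      (fun a b : List Int => a ≤ b) := by
    refine (hp.filter _).imp_of_mem ?_
    intro a b ha hb hab
    have hla : ((a.length : Int)) = L := by simpa using (List.of_mem_filter ha)
    have hlb : ((b.length : Int)) = L := by simpa using (List.of_mem_filter hb)
    exact pv_kf_le_of_len_eq hab (hla.trans hlb.symm)
  have hpw2 := PySem.List.sorted_pairwise
    (ks.filter (fun x => ((x.length : Int) == L))) (fun x : List Int => x)
  exact PySem.List.eq_of_perm_of_pairwise_le_of_injective (fun x : List Int => x)
    (fun a b h => h) hperm2 hpw1 hpw2

-- ---- splitting the wrap bucket ----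

theorem pv_filter_or_split {S : List (List Int)} (hp : S.Pairwise (fun a b => pvKf a ≤ pvKf b))
    (M : Int) (hM : 0 < M) :
    S.filter (fun x => ((x.length : Int) == 0) || ((x.length : Int) == M))
      = S.filter (fun x => ((x.length : Int) == 0))
        ++ S.filter (fun x => ((x.length : Int) == M)) := by
  induction S with
  | nil => rfl
  | cons h t ih =>
    rw [List.pairwise_cons] at hp
    obtain ⟨hhd, htl⟩ := hp
    by_cases h0 : ((h.length : Int)) = 0
    · have h0' : h = [] := by
        rw [← List.length_eq_zero_iff]; omega
      have hM0 : ¬ ((h.length : Int) = M) := by omega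
      simp [h0', ih htl, hM.ne]
    · have h0' : h ≠ [] := by
        intro e; rw [e] at h0; simp at h0
      by_cases hMh : ((h.length : Int)) = M
      · have ht0 : t.filter (fun x => ((x.length : Int) == 0)) = [] := by
          rw [List.filter_eq_nil_iff]
          intro y hy
          have := pv_kf_le_len (hhd y hy)
          simp only [beq_iff_eq]
          omega
        simp [hMh, ih htl, ht0, hM.ne']
      · simp [h0', hMh, ih htl]

-- ---- filters of a strictly increasing Int list ----

theorem pv_filter_single {l : List Int} (hp : l.Pairwise (· < ·)) (c : Int) :
    l.filter (fun L => L == c) = if c ∈ l then [c] else [] := by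
  induction l with
  | nil => simp
  | cons a t ih =>
    rw [List.pairwise_cons] at hp
    obtain ⟨hhd, htl⟩ := hp
    by_cases hac : a = c
    · subst hac
      have : a ∉ t := fun h => lt_irrefl a (hhd a h)
      have ht : t.filter (fun L => L == a) = [] := by
        rw [List.filter_eq_nil_iff]; intro y hy; simp; exact (hhd y hy).ne'
      simp [ht]
    · simp [hac, ih htl, List.mem_cons, Ne.symm hac]

theorem pv_filter_two {l : List Int} (hp : l.Pairwise (· < ·)) (c d : Int) (hcd : c < d) :
    l.filter (fun L => (L == c) || (L == d))
      = (if c ∈ l then [c] else []) ++ (if d ∈ l then [d] else []) := by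
  induction l with
  | nil => simp
  | cons a t ih =>
    rw [List.pairwise_cons] at hp
    obtain ⟨hhd, htl⟩ := hp
    by_cases hac : a = c
    · subst hac
      have hct : a ∉ t := fun h => lt_irrefl a (hhd a h)
      have hda : d ≠ a := hcd.ne'
      simp [ih htl, hct, List.mem_cons, hda]
    · by_cases had : a = d
      · have hat : d ∉ t := fun hm => by have := hhd d hm; omega
        have hctt : c ∉ t := fun hm => by have := hhd c hm; omega
        have ht : t.filter (fun L => (L == c) || (L == d)) = [] := by
          rw [List.filter_eq_nil_iff]; intro y hy
          have := hhd y hy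
          simp; omega
        simp [had, ht, hat, hctt, List.mem_cons, hcd.ne]
      · simp [hac, had, ih htl, List.mem_cons, Ne.symm hac, Ne.symm had]

-- ---- the main equivalence ----

theorem pv_main (rl : List (List Int × Int)) (hnil : rl ≠ [])
    (hpre : ∃ p ∈ rl, p.1 ≠ []) : gather_same_size rl = gather_same_size_alt rl := by
  obtain ⟨q, hq, hq1⟩ := hpre
  have hlen0 : ¬ (rl.length = 0) := by simpa [List.length_eq_zero_iff] using hnil
  -- ---- the sorted list S and its projection to first components ----
  set S := PySem.List.sorted rl (fun x => pvKf x.1) with hSdef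
  have hSperm : S.Perm rl := by rw [hSdef]; exact PySem.List.sorted_perm _ _ _
  have hpairS : S.Pairwise (fun a b => pvKf a.1 ≤ pvKf b.1) := by
    rw [hSdef, pv_sorted_instEq (i2 := (Prod.Lex.instLinearOrder Int (List Int)).toLT)
      (d2 := (Prod.Lex.instLinearOrder Int (List Int)).toDecidableLT) rfl]
    exact PySem.List.sorted_pairwise rl _
  have hSlen : S.length = rl.length := hSperm.length_eq
  have hSpos : 0 < S.length := by
    rw [hSlen]; exact List.length_pos_of_ne_nil hnil
  set ks : List (List Int) := rl.map Prod.fst with hksdef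
  set ksS : List (List Int) := S.map Prod.fst with hksSdef
  have hksperm : ksS.Perm ks := hSperm.map Prod.fst
  have hpairKs : ksS.Pairwise (fun a b => pvKf a ≤ pvKf b) := by
    rw [hksSdef, List.pairwise_map]; exact hpairS
  -- ---- the maximal length M ----
  have hlast0 : PySem.List.pyGet? S (-1) = some (S[S.length - 1]'(by omega)) := by
    unfold PySem.List.pyGet? PySem.List.pyIdx?
    rw [if_neg (by omega), if_pos (by omega)]
    simp [List.getElem?_eq_getElem (by omega : S.length - 1 < S.length)]
  obtain ⟨lv, hlv, hlveq⟩ :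
      ∃ v, PySem.List.pyGet? S (-1) = some v ∧ v = S[S.length - 1]'(by omega) :=
    ⟨_, hlast0, rfl⟩
  set M : Nat := lv.1.length with hMdef
  have hmaxS : ∀ i (h : i < S.length), pvKf (S[i].1) ≤ pvKf lv.1 := by
    rw [hlveq]
    intro i h
    rcases Nat.lt_or_ge i (S.length - 1) with hlt | hge
    · exact List.pairwise_iff_getElem.1 hpairS i (S.length - 1) h (by omega) hlt
    · have : i = S.length - 1 := by omega
      subst this; exact le_refl _
  have hmax : ∀ x ∈ ks, (x.length : Int) ≤ (M : Int) := by
    intro x hx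
    obtain ⟨p, hp, rfl⟩ := List.mem_map.1 hx
    obtain ⟨i, hi, hie⟩ := List.mem_iff_getElem.1 (hSperm.mem_iff.2 hp)
    rw [← hie]
    exact pv_kf_le_len (hmaxS i hi)
  have hMmem : ((M : Int)) ∈ ks.map (fun y => (y.length : Int)) := by
    refine List.mem_map.2 ⟨lv.1, ?_, rfl⟩
    refine List.mem_map.2 ⟨lv, ?_, rfl⟩
    rw [hlveq]
    exact hSperm.mem_iff.1 (List.getElem_mem _)
  have hM1 : 1 ≤ M := by
    have h1 : q.1 ∈ ks := List.mem_map.2 ⟨q, hq, rfl⟩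
    have h2 := hmax q.1 h1
    have h3 : 0 < q.1.length := List.length_pos_of_ne_nil hq1
    omega
  -- ---- B's dict ----
  set buckets := rl.foldl
    (fun d p => d.modify ((p.1.length : Int)) [] (fun b => b ++ [p.1])) PySem.Dict.empty
    with hbdef
  have hbk : ∀ L : Int, buckets.getD L [] = ks.filter (fun y => ((y.length : Int) == L)) :=
    fun L => pv_buckets_getD rl L
  have hkeys : buckets.keys = PySem.Set.ofList (ks.map (fun y => (y.length : Int))) :=
    pv_buckets_keys rl
  have hkeysne : buckets.keys ≠ [] := by
    rw [hkeys]; exact List.ne_nil_of_mem ((PySem.Set.mem_ofList _ _).2 hMmem)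
  have hMkeys : ((M : Int)) ∈ buckets.keys := by
    rw [hkeys]; exact (PySem.Set.mem_ofList _ _).2 hMmem
  have hmB : PySem.List.maxD buckets.keys (fun k => k) 0 = (M : Int) := by
    set mB := PySem.List.maxD buckets.keys (fun k : Int => k) 0 with hmBdef
    have hmem : mB ∈ buckets.keys := PySem.List.maxD_mem buckets.keys (fun k : Int => k) 0 hkeysne
    have hsome : PySem.List.max? buckets.keys (fun k : Int => k) = some mB := by
      rw [hmBdef]; exact PySem.List.max?_eq_some_maxD _ _ _ hkeysne
    rw [pv_max?_instEq (i2 := (Int.instLinearOrder).toLT)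
      (d2 := (Int.instLinearOrder).toDecidableLT) rfl] at hsome
    have hisMax := PySem.List.max?_isMax hsome
    have h1 : mB ≤ (M : Int) := by
      rw [hkeys] at hmem
      obtain ⟨y, hy, he⟩ := List.mem_map.1 ((PySem.Set.mem_ofList _ _).1 hmem)
      rw [← he]; exact hmax y hy
    have h2 : (M : Int) ≤ mB := hisMax _ hMkeys
    exact le_antisymm h1 h2
  -- ---- the sorted key list of B ----
  set Ls := PySem.List.sorted buckets.keys (fun k => k) with hLsdef
  have hLpair : Ls.Pairwise (· < ·) := by
    rw [hLsdef, pv_sorted_instEq (i2 := (Int.instLinearOrder).toLT)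
      (d2 := (Int.instLinearOrder).toDecidableLT) rfl, hkeys]
    exact PySem.List.sorted_ofList_pairwise_lt _
  have hLmem : ∀ L : Int, L ∈ Ls ↔ L ∈ ks.map (fun y => (y.length : Int)) := by
    intro L
    rw [hLsdef, PySem.List.mem_sorted, hkeys, PySem.Set.mem_ofList]
  have hLbound : ∀ L ∈ Ls, 0 ≤ L ∧ L ≤ (M : Int) := by
    intro L hL
    obtain ⟨y, hy, he⟩ := List.mem_map.1 ((hLmem L).1 hL)
    subst he
    exact ⟨by positivity, hmax y hy⟩
  -- ---- unfold both ports to the distribution folds ----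
  rw [gather_same_size, gather_same_size_alt]
  rw [if_neg hlen0, pv_sorted2_eq, ← hSdef]
  simp only [hlv]
  rw [← hbdef, ← hLsdef, hmB]
  show (S.foldl (fun res i => pyExtendAt res ((i.1.length : Int) - 1) [i.1])
      (List.replicate M ([] : List (List Int))))
    = Ls.foldl (fun res length =>
        pyExtendAt res (length - 1) (PySem.List.sorted (buckets.getD length []) (fun x => x)))
      (List.replicate (M : Int).toNat ([] : List (List Int)))
  rw [Int.toNat_natCast]
  have hfoldA : S.foldl (fun res i => pyExtendAt res ((i.1.length : Int) - 1) [i.1])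
      (List.replicate M ([] : List (List Int)))
      = ksS.foldl (fun r y => pyExtendAt r ((y.length : Int) - 1) [y])
        (List.replicate M ([] : List (List Int))) := by
    rw [hksSdef]
    exact (List.foldl_map (f := Prod.fst)
      (g := fun r (y : List Int) => pyExtendAt r ((y.length : Int) - 1) [y])
      (l := S) (init := List.replicate M [])).symm
  rw [hfoldA]
  -- ---- elementwise comparison ----
  have hlenA : (ksS.foldl (fun r y => pyExtendAt r ((y.length : Int) - 1) [y])
      (List.replicate M ([] : List (List Int)))).length = M := by
    rw [pv_foldl_extendAt_length, List.length_replicate]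
  have hlenB : (Ls.foldl (fun res length =>
      pyExtendAt res (length - 1) (PySem.List.sorted (buckets.getD length []) (fun x => x)))
      (List.replicate M ([] : List (List Int)))).length = M := by
    rw [pv_foldl_extendAt_length, List.length_replicate]
  apply List.ext_getElem (by rw [hlenA, hlenB])
  intro j hj1 hj2
  have hjM : j < M := by rw [hlenA] at hj1; exact hj1
  rw [← List.getD_eq_getElem _ [] hj1, ← List.getD_eq_getElem _ [] hj2]
  rw [pv_foldl_extendAt_getD _ _ _ _ j (by simpa using hjM),
    pv_foldl_extendAt_getD _ _ _ _ j (by simpa using hjM)]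
  rw [List.getD_replicate _ hjM, List.length_replicate, List.flatMap_singleton']
  simp only [List.nil_append, hbk]
  -- the target-index predicate, on each side
  have hpredA : ∀ x ∈ ksS,
      (PySem.List.pyIdx? M ((x.length : Int) - 1) == some j)
        = (((x.length : Int) == (j : Int) + 1)
            || (((x.length : Int) == 0) && ((j : Nat) + 1 == M))) := by
    intro x hx
    have hxk : x ∈ ks := hksperm.mem_iff.1 hx
    rw [Bool.eq_iff_iff]
    simp only [beq_iff_eq, Bool.or_eq_true, Bool.and_eq_true]
    rw [pv_pyIdx?_pred M _ (by positivity) (hmax x hxk) j hjM]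
    constructor
    · rintro (h | ⟨h1, h2⟩)
      · exact Or.inl h
      · exact Or.inr ⟨h1, by omega⟩
    · rintro (h | ⟨h1, h2⟩)
      · exact Or.inl h
      · exact Or.inr ⟨h1, by omega⟩
  have hpredB : ∀ L ∈ Ls,
      (PySem.List.pyIdx? M (L - 1) == some j)
        = ((L == (j : Int) + 1) || ((L == 0) && ((j : Nat) + 1 == M))) := by
    intro L hL
    obtain ⟨h0L, hLM⟩ := hLbound L hL
    rw [Bool.eq_iff_iff]
    simp only [beq_iff_eq, Bool.or_eq_true, Bool.and_eq_true]
    rw [pv_pyIdx?_pred M _ h0L hLM j hjM]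
    constructor
    · rintro (h | ⟨h1, h2⟩)
      · exact Or.inl h
      · exact Or.inr ⟨h1, by omega⟩
    · rintro (h | ⟨h1, h2⟩)
      · exact Or.inl h
      · exact Or.inr ⟨h1, by omega⟩
  rw [List.filter_congr hpredA, List.filter_congr hpredB]
  rcases Nat.lt_or_ge (j + 1) M with hjlt | hjge
  · -- an ordinary bucket: only length j+1 lands at slot j
    have hne : ((j : Nat) + 1 == M) = false := by simp; omega
    simp only [hne, Bool.and_false, Bool.or_false]
    rw [pv_filter_len_sorted hpairKs hksperm ((j : Int) + 1)]
    rw [pv_filter_single hLpair ((j : Int) + 1)]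
    by_cases hmem : ((j : Int) + 1) ∈ Ls
    · simp [hmem]
    · have hempty : ks.filter (fun x => ((x.length : Int) == (j : Int) + 1)) = [] := by
        rw [List.filter_eq_nil_iff]
        intro y hy
        simp only [beq_iff_eq]
        intro he
        exact hmem ((hLmem _).2 (List.mem_map.2 ⟨y, hy, he⟩))
      rw [hempty]
      simp only [if_neg hmem, List.flatMap_nil]
      rfl
  · -- the last slot: lengths M and (wrapping) 0 land at slot M-1
    have hjeq : j + 1 = M := by omega
    have heq : ((j : Nat) + 1 == M) = true := by simp [hjeq]
    simp only [heq, Bool.and_true]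
    have hsw1 : ∀ x ∈ ksS, (((x.length : Int) == (j : Int) + 1) || ((x.length : Int) == 0))
        = (((x.length : Int) == 0) || ((x.length : Int) == (M : Int))) := by
      intro x _
      have : ((j : Int) + 1) = (M : Int) := by omega
      rw [this, Bool.or_comm]
    have hsw2 : ∀ L ∈ Ls, ((L == (j : Int) + 1) || (L == 0))
        = ((L == 0) || (L == (M : Int))) := by
      intro L _
      have : ((j : Int) + 1) = (M : Int) := by omega
      rw [this, Bool.or_comm]
    rw [List.filter_congr hsw1, List.filter_congr hsw2]
    rw [pv_filter_or_split hpairKs (M : Int) (by exact_mod_cast hM1)]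
    rw [pv_filter_two hLpair 0 (M : Int) (by exact_mod_cast hM1)]
    rw [if_pos ((hLmem _).2 hMmem)]
    rw [pv_filter_len_sorted hpairKs hksperm 0,
      pv_filter_len_sorted hpairKs hksperm (M : Int)]
    by_cases h0 : (0 : Int) ∈ Ls
    · simp [h0]
    · have hempty : ks.filter (fun x => ((x.length : Int) == 0)) = [] := by
        rw [List.filter_eq_nil_iff]
        intro y hy
        simp only [beq_iff_eq]
        intro he
        exact h0 ((hLmem _).2 (List.mem_map.2 ⟨y, hy, he⟩))
      rw [hempty]
      simp only [if_neg h0, List.nil_append, List.flatMap_cons, List.flatMap_nil, List.append_nil]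
      rfl

-- ===== VERDICT (by name: the statement is the Claim_ definition above) =====
theorem gather_same_size_spec : Claim_equal_gather_same_size := by
  intro rl _hdom hpre
  unfold Spec_gather_same_size
  rcases hpre with h | h
  · subst h; rfl
  · exact pv_main rl (by rintro rfl; simp at h) h
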